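-- pv_equiv track=rewrite | github.com/VictorGFM/foo-bar | 5-1-dodge-the-lasers/solution.py | calculateSumSequence
-- ===== SOURCE A (Python) =====
-- factor = 4142135623730950488016887242096980785696718753769480731766797379907324784621070388503875343276415727
--
-- def calculateSumSequence(n):
--     if n == 0:
--         return 0
--
--     nPrime = (factor * n)//(10**100)
--     p = n * nPrime
--     q = (n * (n + 1)) // 2
--     r = (nPrime * (nPrime + 1)) // 2
--
--     return p + q - r - calculateSumSequence(nPrime)
-- ===== SOURCE B (Python) =====
-- factor = 4142135623730950488016887242096980785696718753769480731766797379907324784621070388503875343276415727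
--
-- def calculateSumSequence(n):
--     total = 0
--     sign = 1
--     current = n
--     while current != 0:
--         nPrime = (factor * current) // (10**100)
--         total += sign * (current * nPrime + current * (current + 1) // 2
--                          - nPrime * (nPrime + 1) // 2)
--         sign = -sign
--         current = nPrime
--     return total
-- ===== Notes on version B (the rewrite author's own statement) =====
-- stated objective: alternative
-- what changed: Unrolled A's recursion S(n) = (p+q-r) - S(n') into an iterative loop that accumulates the per-level terms with an alternating sign, so no call stack is used.
-- outside the precondition, e.g. on calculateSumSequence(-1): A raises RecursionError, B does not finish within the time limit
import Mathlib
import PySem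

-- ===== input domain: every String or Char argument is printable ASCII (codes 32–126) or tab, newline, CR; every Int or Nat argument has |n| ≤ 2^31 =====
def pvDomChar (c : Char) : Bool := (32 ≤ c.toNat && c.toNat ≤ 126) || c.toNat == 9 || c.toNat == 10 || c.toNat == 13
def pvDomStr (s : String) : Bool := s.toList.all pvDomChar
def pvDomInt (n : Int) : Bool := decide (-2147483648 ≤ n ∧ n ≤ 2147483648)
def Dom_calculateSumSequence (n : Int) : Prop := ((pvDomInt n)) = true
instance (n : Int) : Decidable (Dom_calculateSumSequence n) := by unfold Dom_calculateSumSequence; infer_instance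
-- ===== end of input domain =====

-- B unrolls A's recursion into an alternating-sign iterative accumulation; equal results proved on all n ≥ 0 (A raises RecursionError on n < 0).

def pvFactor : Int := 4142135623730950488016887242096980785696718753769480731766797379907324784621070388503875343276415727

-- termination fact for both ports: for 0 < n, 0 ≤ nPrime < n
theorem pvNPrime_lt (n : Int) (h : 0 < n) :
    0 ≤ PySem.Int.floordiv (pvFactor * n) (10 ^ 100) ∧
    PySem.Int.floordiv (pvFactor * n) (10 ^ 100) < n := by
  have hb : (0 : Int) < 10 ^ 100 := by positivity
  constructor
  · rw [PySem.Int.le_floordiv_iff_mul_le hb]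
    have : (0 : Int) < pvFactor := by norm_num [pvFactor]
    nlinarith
  · rw [PySem.Int.floordiv_lt_iff_lt_mul hb]
    have : pvFactor < 10 ^ 100 := by norm_num [pvFactor]
    nlinarith

-- ===== PORT A =====
-- literal port of A's recursion; Python's `if n == 0` is widened to n ≤ 0 for
-- totality only (Python diverges on n < 0, which Pre_ excludes)
def calculateSumSequence (n : Int) : Int :=
  if n ≤ 0 then 0
  else
    let nPrime := PySem.Int.floordiv (pvFactor * n) (10 ^ 100)
    let p := n * nPrime
    let q := PySem.Int.floordiv (n * (n + 1)) 2
    let r := PySem.Int.floordiv (nPrime * (nPrime + 1)) 2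
    p + q - r - calculateSumSequence nPrime
termination_by n.toNat
decreasing_by
  have := pvNPrime_lt n (by omega)
  omega

-- ===== PORT B =====
-- B's while-loop as tail recursion over (current, sign, total); Python's
-- `while current != 0` is widened to current ≤ 0 for totality only
-- (the Python loop never terminates on current < 0, which Pre_ excludes)
def pvAltLoop (current sign total : Int) : Int :=
  if current ≤ 0 then total
  else
    let nPrime := PySem.Int.floordiv (pvFactor * current) (10 ^ 100)
    pvAltLoop nPrime (-sign)
      (total + sign * (current * nPrime
        + PySem.Int.floordiv (current * (current + 1)) 2
        - PySem.Int.floordiv (nPrime * (nPrime + 1)) 2))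
termination_by current.toNat
decreasing_by
  have := pvNPrime_lt current (by omega)
  omega

def calculateSumSequence_alt (n : Int) : Int := pvAltLoop n 1 0

-- ===== PRECONDITION & SPEC =====
-- Pre_ excludes negative n, on which the Python A exhausts recursion depth
-- (RecursionError) and the Python B loops forever (nPrime stays negative).
def Pre_calculateSumSequence (n : Int) : Prop := 0 ≤ n
instance (n : Int) : Decidable (Pre_calculateSumSequence n) := by unfold Pre_calculateSumSequence; infer_instance
def pvWitness_calculateSumSequence : Int := (10)

def Spec_calculateSumSequence (n : Int) (out : Int) : Prop := out = calculateSumSequence_alt n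
instance (n : Int) (out : Int) : Decidable (Spec_calculateSumSequence n out) := by unfold Spec_calculateSumSequence; infer_instance

-- ===== CLAIM (what is proved, stated in full; the proofs are below) =====
def Claim_equal_calculateSumSequence : Prop := ∀ (n : Int), Dom_calculateSumSequence n → Pre_calculateSumSequence n → Spec_calculateSumSequence n (calculateSumSequence n)

-- ===== LEMMAS AND PROOFS =====

-- loop invariant: the accumulator form equals total + sign * S(current)
theorem pvAltLoop_eq (k : Nat) : ∀ (current : Int), 0 ≤ current → current.toNat ≤ k →
    ∀ (sign total : Int), pvAltLoop current sign total = total + sign * calculateSumSequence current := by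
  induction k with
  | zero =>
    intro c hc hk sign total
    have hc0 : c = 0 := by omega
    subst hc0
    rw [pvAltLoop, calculateSumSequence]
    simp
  | succ k ih =>
    intro c hc hk sign total
    by_cases h0 : c ≤ 0
    · have hc0 : c = 0 := by omega
      subst hc0
      rw [pvAltLoop, calculateSumSequence]
      simp
    · have hnp := pvNPrime_lt c (by omega)
      rw [pvAltLoop, calculateSumSequence]
      rw [if_neg h0, if_neg h0]
      simp only []
      rw [ih _ hnp.1 (by omega)]
      ring

-- ===== VERDICT (by name: the statement is the Claim_ definition above) =====
theorem calculateSumSequence_spec : Claim_equal_calculateSumSequence := by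
  intro n _ hpre
  unfold Spec_calculateSumSequence calculateSumSequence_alt
  rw [pvAltLoop_eq n.toNat n hpre (le_refl _)]
  ring
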